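-- pv_equiv track=rewrite | github.com/kristaps200303/parallel-processing-kristapsozolins2003 | finish.py | parallel_processing
-- ===== SOURCE A (Python) =====
-- def parallel_processing(n,m, linija2):
--     output = []
--     thrd = []
--     j=0
--     for f in range(n):
--         thrd.append([0,f])
--
--     while j < m:
--         minvert = min(thrd)
--         laiks = linija2[j]
--         output.append((minvert[1], minvert[0]))
--         minvert[0] = minvert[0] + laiks
--
--         j = j + 1
--
--
--     return output
-- ===== SOURCE B (Python) =====
-- def parallel_processing(n, m, linija2):
--     # leftist min-heap of (finish_time, machine_index); node = (key, rank, left, right)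
--     def rank(h):
--         return 0 if h is None else h[1]
--
--     def merge(a, b):
--         if a is None:
--             return b
--         if b is None:
--             return a
--         if b[0] < a[0]:
--             a, b = b, a
--         key, _, l, r = a
--         m2 = merge(r, b)
--         if rank(l) >= rank(m2):
--             return (key, rank(m2) + 1, l, m2)
--         return (key, rank(l) + 1, m2, l)
--
--     heap = None
--     for f in range(n):
--         heap = merge(heap, ((0, f), 1, None, None))
--     output = []
--     for j in range(m):
--         (t, f), _, l, r = heap
--         output.append((f, t))
--         heap = merge(merge(l, r), ((t + linija2[j], f), 1, None, None))
--     return output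
-- ===== Notes on version B (the rewrite author's own statement) =====
-- stated objective: faster
-- what changed: A rescans the whole machine list with min() on every task and mutates the found cell; B keeps the machines in a leftist min-heap keyed by (time, index), popping the root and merging the updated machine back, so no per-step linear scan remains.
import Mathlib
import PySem

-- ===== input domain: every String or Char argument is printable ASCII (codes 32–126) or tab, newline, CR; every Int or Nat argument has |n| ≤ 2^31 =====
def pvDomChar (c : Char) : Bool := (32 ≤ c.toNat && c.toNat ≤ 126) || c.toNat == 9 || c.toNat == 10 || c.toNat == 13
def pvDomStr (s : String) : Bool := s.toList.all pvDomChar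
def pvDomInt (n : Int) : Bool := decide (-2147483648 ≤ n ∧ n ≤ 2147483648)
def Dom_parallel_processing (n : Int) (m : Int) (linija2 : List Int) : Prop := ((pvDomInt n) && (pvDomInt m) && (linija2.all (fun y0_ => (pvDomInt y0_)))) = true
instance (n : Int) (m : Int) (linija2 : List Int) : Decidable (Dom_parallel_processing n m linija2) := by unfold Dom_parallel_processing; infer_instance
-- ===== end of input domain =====

-- B replaces A's full rescan with min() each step by a leftist min-heap (pop root, merge back);
-- objective: faster, O((n+m) log n) vs O(m*n).


-- Python's lexicographic '<' on the (time, index) pairs both programs compare (exact: tuple compare)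
def pvLexLt (x y : Int × Int) : Bool :=
  decide (x.1 < y.1) || (decide (x.1 = y.1) && decide (x.2 < y.2))

-- ===== PORT A =====
-- min(thrd): Python's running-minimum fold, keeping the FIRST minimal element (exact)
def pvMinFold (x : Int × Int) (xs : List (Int × Int)) : Int × Int :=
  xs.foldl (fun cur y => if pvLexLt y cur then y else cur) x

def pvMin? : List (Int × Int) → Option (Int × Int)
  | [] => none
  | x :: xs => some (pvMinFold x xs)

-- 'minvert[0] = minvert[0] + laiks': Python mutates the cell min() returned, i.e. the first
-- occurrence equal to it (exact: min returns the first minimal element)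
def pvReplaceFirst (v new : Int × Int) : List (Int × Int) → List (Int × Int)
  | [] => []
  | y :: ys => if y = v then new :: ys else y :: pvReplaceFirst v new ys

def pvALoop (linija2 : List Int) : Nat → Int → List (Int × Int) → List (Int × Int) → List (Int × Int)
  | 0, _, _, out => out
  | fuel+1, j, thrd, out =>
    match pvMin? thrd with
    | none => out  -- Python: min([]) raises ValueError (outside Pre_)
    | some mv =>
      match PySem.List.pyGet? linija2 j with
      | none => out  -- Python: IndexError (outside Pre_)
      | some laiks =>
          pvALoop linija2 fuel (j+1) (pvReplaceFirst mv (mv.1 + laiks, mv.2) thrd) (out ++ [(mv.2, mv.1)])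

def parallel_processing (n : Int) (m : Int) (linija2 : List Int) : List (Int × Int) :=
  pvALoop linija2 m.toNat 0 ((PySem.List.pyRange 0 n 1).map (fun f => ((0 : Int), f))) []

-- ===== PORT B =====
-- leftist-heap node (key, rank, left, right); None = leaf
inductive PvHeap
  | leaf
  | node : (Int × Int) → Int → PvHeap → PvHeap → PvHeap
deriving DecidableEq, Repr

def pvRank : PvHeap → Int
  | .leaf => 0
  | .node _ rk _ _ => rk

-- Source B's merge: if b[0] < a[0] swap; merge right child with b, put the larger-rank child left.
-- Structural fuel (total size, exact) makes the recursion kernel-computable.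
def pvHMergeF : Nat → PvHeap → PvHeap → PvHeap
  | 0, _, b => b
  | _+1, .leaf, b => b
  | _+1, .node x rk l1 r1, .leaf => .node x rk l1 r1
  | fuel+1, .node x rk1 l1 r1, .node y rk2 l2 r2 =>
    if pvLexLt y x then
      let m2 := pvHMergeF fuel r2 (.node x rk1 l1 r1)
      if pvRank l2 ≥ pvRank m2 then .node y (pvRank m2 + 1) l2 m2
      else .node y (pvRank l2 + 1) m2 l2
    else
      let m2 := pvHMergeF fuel r1 (.node y rk2 l2 r2)
      if pvRank l1 ≥ pvRank m2 then .node x (pvRank m2 + 1) l1 m2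
      else .node x (pvRank l1 + 1) m2 l1


-- k is a fixed merge-fuel bound (the number of machines, never exceeded by any merge)
def pvBLoop (linija2 : List Int) (k : Nat) : Nat → Int → PvHeap → List (Int × Int) → List (Int × Int)
  | 0, _, _, out => out
  | fuel+1, j, heap, out =>
    match heap with
    | .leaf => out  -- Python: unpacking None raises TypeError (outside Pre_)
    | .node (t, f) _ l r =>
      match PySem.List.pyGet? linija2 j with
      | none => out  -- Python: IndexError (outside Pre_)
      | some laiks =>
          pvBLoop linija2 k fuel (j+1)
            (pvHMergeF k (pvHMergeF k l r) (.node (t + laiks, f) 1 .leaf .leaf)) (out ++ [(f, t)])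

def parallel_processing_alt (n : Int) (m : Int) (linija2 : List Int) : List (Int × Int) :=
  pvBLoop linija2 (PySem.List.pyRange 0 n 1).length m.toNat 0
    ((PySem.List.pyRange 0 n 1).foldl
      (fun h f => pvHMergeF (PySem.List.pyRange 0 n 1).length h (.node ((0 : Int), f) 1 .leaf .leaf)) .leaf) []

-- ===== PRECONDITION & SPEC =====
-- Pre_ excludes exactly the inputs where Python A raises: m > 0 with no machine (min of an
-- empty list, ValueError) or with fewer than m tasks in linija2 (IndexError). B raises there too.
def Pre_parallel_processing (n : Int) (m : Int) (linija2 : List Int) : Prop :=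
  m ≤ 0 ∨ (1 ≤ n ∧ m ≤ (linija2.length : Int))
instance (n : Int) (m : Int) (linija2 : List Int) : Decidable (Pre_parallel_processing n m linija2) := by
  unfold Pre_parallel_processing; infer_instance

def pvWitness_parallel_processing : Int × Int × List Int := (3, 4, [2, 1, 3, 1])

def Spec_parallel_processing (n : Int) (m : Int) (linija2 : List Int) (out : List (Int × Int)) : Prop := out = parallel_processing_alt n m linija2
instance (n : Int) (m : Int) (linija2 : List Int) (out : List (Int × Int)) : Decidable (Spec_parallel_processing n m linija2 out) := by unfold Spec_parallel_processing; infer_instance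

-- ===== CLAIM (what is proved, stated in full; the proofs are below) =====
def Claim_equal_parallel_processing : Prop := ∀ (n : Int) (m : Int) (linija2 : List Int), Dom_parallel_processing n m linija2 → Pre_parallel_processing n m linija2 → Spec_parallel_processing n m linija2 (parallel_processing n m linija2)

-- ===== LEMMAS AND PROOFS =====

def PvHeap.size : PvHeap → Nat
  | .leaf => 0
  | .node _ _ l r => l.size + r.size + 1


def PvHeap.toList : PvHeap → List (Int × Int)
  | .leaf => []
  | .node x _ l r => x :: (l.toList ++ r.toList)

-- heap property: every element of either subtree is not strictly below the root, recursively
def PvIsHeap : PvHeap → Prop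
  | .leaf => True
  | .node x _ l r => (∀ y ∈ l.toList ++ r.toList, pvLexLt y x = false) ∧ PvIsHeap l ∧ PvIsHeap r

lemma pvLexLt_irrefl (x : Int × Int) : pvLexLt x x = false := by
  obtain ⟨a, b⟩ := x; simp [pvLexLt]

lemma pvLexLt_trans {a b c : Int × Int} (h1 : pvLexLt a b = true) (h2 : pvLexLt b c = true) :
    pvLexLt a c = true := by
  obtain ⟨a1, a2⟩ := a; obtain ⟨b1, b2⟩ := b; obtain ⟨c1, c2⟩ := c
  simp only [pvLexLt, Bool.or_eq_true, Bool.and_eq_true, decide_eq_true_eq] at *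
  omega

lemma pvLexLt_total {a b : Int × Int} (h : pvLexLt a b = false) (hne : a ≠ b) :
    pvLexLt b a = true := by
  obtain ⟨a1, a2⟩ := a; obtain ⟨b1, b2⟩ := b
  simp only [pvLexLt, Bool.or_eq_false_iff, Bool.or_eq_true, Bool.and_eq_false_iff,
    Bool.and_eq_true, decide_eq_true_eq, decide_eq_false_iff_not, ne_eq, Prod.mk.injEq] at *
  omega

lemma pvLexLt_le_trans {a b c : Int × Int} (h1 : pvLexLt a b = false) (h2 : pvLexLt b c = false) :
    pvLexLt a c = false := by
  obtain ⟨a1, a2⟩ := a; obtain ⟨b1, b2⟩ := b; obtain ⟨c1, c2⟩ := c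
  simp only [pvLexLt, Bool.or_eq_false_iff, Bool.and_eq_false_iff,
    decide_eq_true_eq, decide_eq_false_iff_not] at *
  omega

lemma pvLexLt_trans_not {a b c : Int × Int} (h1 : pvLexLt b a = false) (h2 : pvLexLt b c = true) :
    pvLexLt a c = true := by
  obtain ⟨a1, a2⟩ := a; obtain ⟨b1, b2⟩ := b; obtain ⟨c1, c2⟩ := c
  simp only [pvLexLt, Bool.or_eq_false_iff, Bool.or_eq_true, Bool.and_eq_false_iff,
    Bool.and_eq_true, decide_eq_true_eq, decide_eq_false_iff_not] at *
  omega

lemma pvBool_true_of_not_false {b : Bool} (h : ¬ b = true) : b = false := by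
  cases b with
  | false => rfl
  | true => exact absurd rfl h

lemma pvBool_true_of_not_false' {b : Bool} (h : ¬ b = false) : b = true := by
  cases b with
  | false => exact absurd rfl h
  | true => rfl

-- Python's min(): the fold result is an element and no element is strictly below it
lemma pvMinFold_spec : ∀ (xs : List (Int × Int)) (x : Int × Int),
    pvMinFold x xs ∈ x :: xs ∧ ∀ y ∈ x :: xs, pvLexLt y (pvMinFold x xs) = false := by
  intro xs
  induction xs with
  | nil =>
    intro x
    refine ⟨by simp [pvMinFold], ?_⟩
    intro y hy
    simp only [List.mem_singleton] at hy
    subst hy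
    simpa [pvMinFold] using pvLexLt_irrefl y
  | cons z zs ih =>
    intro x
    by_cases hl : pvLexLt z x = true
    · have hstep : pvMinFold x (z :: zs) = pvMinFold z zs := by
        simp [pvMinFold, List.foldl, hl]
      obtain ⟨hm, hle⟩ := ih z
      rw [hstep]
      refine ⟨?_, ?_⟩
      · rcases List.mem_cons.mp hm with h | h
        · simp [h]
        · exact List.mem_cons_of_mem _ (List.mem_cons_of_mem _ h)
      · intro y hy
        rcases List.mem_cons.mp hy with rfl | hy'
        · by_contra hc
          have hc' : pvLexLt y (pvMinFold z zs) = true := pvBool_true_of_not_false' hc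
          have ht : pvLexLt z (pvMinFold z zs) = true := pvLexLt_trans hl hc'
          have h2 := hle z List.mem_cons_self
          rw [h2] at ht
          exact Bool.false_ne_true ht
        · exact hle y hy'
    · have hl' : pvLexLt z x = false := pvBool_true_of_not_false hl
      have hstep : pvMinFold x (z :: zs) = pvMinFold x zs := by
        simp [pvMinFold, List.foldl, hl']
      obtain ⟨hm, hle⟩ := ih x
      rw [hstep]
      refine ⟨?_, ?_⟩
      · rcases List.mem_cons.mp hm with h | h
        · simp [h]
        · exact List.mem_cons_of_mem _ (List.mem_cons_of_mem _ h)
      · intro y hy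
        rcases List.mem_cons.mp hy with rfl | hy'
        · exact hle y List.mem_cons_self
        · rcases List.mem_cons.mp hy' with rfl | hy''
          · by_contra hc
            have hc' : pvLexLt y (pvMinFold x zs) = true := pvBool_true_of_not_false' hc
            have hxr : pvLexLt x (pvMinFold x zs) = true := pvLexLt_trans_not hl' hc'
            have h2 := hle x List.mem_cons_self
            rw [h2] at hxr
            exact Bool.false_ne_true hxr
          · exact hle y (List.mem_cons_of_mem _ hy'')

lemma pvReplaceFirst_perm {v : Int × Int} (new : Int × Int) {l : List (Int × Int)} (hv : v ∈ l) :
    (pvReplaceFirst v new l).Perm (new :: l.erase v) := by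
  induction l with
  | nil => cases hv
  | cons y ys ih =>
    by_cases hyv : y = v
    · subst hyv
      simp [pvReplaceFirst, List.erase_cons_head]
    · have hv' : v ∈ ys := by
        rcases List.mem_cons.mp hv with h | h
        · exact absurd h.symm hyv
        · exact h
      have herase : (y :: ys).erase v = y :: ys.erase v := by
        rw [List.erase_cons_tail]
        simp [hyv]
      simp only [pvReplaceFirst, if_neg hyv, herase]
      exact ((ih hv').cons y).trans (List.Perm.swap new y (ys.erase v))

lemma pvHeap_size_zero {a : PvHeap} (h : a.size = 0) : a = .leaf := by
  cases a with
  | leaf => rfl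
  | node x rk l r => simp [PvHeap.size] at h

lemma pvHeap_size_toList (a : PvHeap) : a.size = a.toList.length := by
  induction a with
  | leaf => simp [PvHeap.size, PvHeap.toList]
  | node x rk l r ihl ihr => simp [PvHeap.size, PvHeap.toList, ihl, ihr]

lemma pvReplaceFirst_length (v new : Int × Int) : ∀ (l : List (Int × Int)),
    (pvReplaceFirst v new l).length = l.length := by
  intro l
  induction l with
  | nil => rfl
  | cons y ys ih => by_cases h : y = v <;> simp [pvReplaceFirst, h, ih]

lemma pvHMergeF_count (c : Int × Int) : ∀ (fuel : Nat) (a b : PvHeap),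
    a.size + b.size ≤ fuel →
    ((pvHMergeF fuel a b).toList).count c = a.toList.count c + b.toList.count c := by
  intro fuel
  induction fuel with
  | zero =>
    intro a b hf
    have ha : a = .leaf := pvHeap_size_zero (by omega)
    subst ha
    simp [pvHMergeF, PvHeap.toList]
  | succ fuel ih =>
    intro a b hf
    match a, b with
    | .leaf, b => simp [pvHMergeF, PvHeap.toList]
    | .node x rk1 l1 r1, .leaf => simp [pvHMergeF, PvHeap.toList]
    | .node x rk1 l1 r1, .node y rk2 l2 r2 =>
      simp only [PvHeap.size] at hf
      by_cases hlt : pvLexLt y x = true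
      · have h1 : r2.size + (PvHeap.node x rk1 l1 r1).size ≤ fuel := by
          simp only [PvHeap.size]; omega
        simp only [pvHMergeF, if_pos hlt]
        split <;>
          (simp only [PvHeap.toList, List.count_cons, List.count_append, ih _ _ h1]; omega)
      · have h1 : r1.size + (PvHeap.node y rk2 l2 r2).size ≤ fuel := by
          simp only [PvHeap.size]; omega
        simp only [pvHMergeF, if_neg hlt]
        split <;>
          (simp only [PvHeap.toList, List.count_cons, List.count_append, ih _ _ h1]; omega)

lemma pvHMergeF_perm (fuel : Nat) (a b : PvHeap) (hf : a.size + b.size ≤ fuel) :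
    (pvHMergeF fuel a b).toList.Perm (a.toList ++ b.toList) := by
  rw [List.perm_iff_count]
  intro c
  simp [pvHMergeF_count c fuel a b hf, List.count_append]


lemma pvHeap_dom {x : Int × Int} {rk : Int} {l r : PvHeap} (h : PvIsHeap (.node x rk l r)) :
    ∀ y ∈ (PvHeap.node x rk l r).toList, pvLexLt y x = false := by
  intro y hy
  rcases List.mem_cons.mp hy with rfl | hy'
  · exact pvLexLt_irrefl y
  · exact h.1 y hy'

lemma pvHMergeF_isHeap : ∀ (fuel : Nat) (a b : PvHeap), a.size + b.size ≤ fuel →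
    PvIsHeap a → PvIsHeap b → PvIsHeap (pvHMergeF fuel a b) := by
  intro fuel
  induction fuel with
  | zero => intro a b _ _ hb; simpa [pvHMergeF] using hb
  | succ fuel ih =>
    intro a b hf ha hb
    match a, b with
    | .leaf, b => simpa [pvHMergeF] using hb
    | .node x rk1 l1 r1, .leaf => simpa [pvHMergeF] using ha
    | .node x rk1 l1 r1, .node y rk2 l2 r2 =>
      simp only [PvHeap.size] at hf
      by_cases hlt : pvLexLt y x = true
      · have h1 : r2.size + (PvHeap.node x rk1 l1 r1).size ≤ fuel := by
          simp only [PvHeap.size]; omega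
        have hdom : ∀ z, z ∈ l2.toList ∨ z ∈ (pvHMergeF fuel r2 (.node x rk1 l1 r1)).toList →
            pvLexLt z y = false := by
          intro z hz
          rcases hz with hz2 | hz1
          · exact hb.1 z (List.mem_append.mpr (Or.inl hz2))
          · rcases (pvHMergeF_perm fuel r2 (.node x rk1 l1 r1) h1).mem_iff.mp hz1 with hz3
            rcases List.mem_append.mp hz3 with hz4 | hz5
            · exact hb.1 z (List.mem_append.mpr (Or.inr hz4))
            · -- z in the a-tree: z not below x, and y < x, so z not below y
              have hzx : pvLexLt z x = false := pvHeap_dom ha z hz5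
              by_contra hc
              have hc' : pvLexLt z y = true := pvBool_true_of_not_false' hc
              have := pvLexLt_trans hc' hlt
              rw [hzx] at this
              exact Bool.false_ne_true this
        have hm : PvIsHeap (pvHMergeF fuel r2 (.node x rk1 l1 r1)) := ih _ _ h1 hb.2.2 ha
        simp only [pvHMergeF, if_pos hlt]
        split
        · exact ⟨fun z hz => hdom z ((List.mem_append.mp hz).imp id id), hb.2.1, hm⟩
        · exact ⟨fun z hz => hdom z ((List.mem_append.mp hz).symm.imp id id), hm, hb.2.1⟩
      · have hyx : pvLexLt y x = false := pvBool_true_of_not_false hlt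
        have h1 : r1.size + (PvHeap.node y rk2 l2 r2).size ≤ fuel := by
          simp only [PvHeap.size]; omega
        have hdom : ∀ z, z ∈ l1.toList ∨ z ∈ (pvHMergeF fuel r1 (.node y rk2 l2 r2)).toList →
            pvLexLt z x = false := by
          intro z hz
          rcases hz with hz2 | hz1
          · exact ha.1 z (List.mem_append.mpr (Or.inl hz2))
          · rcases (pvHMergeF_perm fuel r1 (.node y rk2 l2 r2) h1).mem_iff.mp hz1 with hz3
            rcases List.mem_append.mp hz3 with hz4 | hz5
            · exact ha.1 z (List.mem_append.mpr (Or.inr hz4))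
            · exact pvLexLt_le_trans (pvHeap_dom hb z hz5) hyx
        have hm : PvIsHeap (pvHMergeF fuel r1 (.node y rk2 l2 r2)) := ih _ _ h1 ha.2.2 hb
        simp only [pvHMergeF, if_neg hlt]
        split
        · exact ⟨fun z hz => hdom z ((List.mem_append.mp hz).imp id id), ha.2.1, hm⟩
        · exact ⟨fun z hz => hdom z ((List.mem_append.mp hz).symm.imp id id), hm, ha.2.1⟩


-- Python's min of any list permuting a heap's elements is the heap's root
lemma pvMin?_of_heap {t f rk : Int} {l r : PvHeap} {thrd : List (Int × Int)}
    (hperm : (PvHeap.node (t, f) rk l r).toList.Perm thrd)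
    (hh : PvIsHeap (.node (t, f) rk l r)) :
    pvMin? thrd = some (t, f) := by
  rcases thrd with _ | ⟨x, xs⟩
  · exact absurd hperm.eq_nil (by simp [PvHeap.toList])
  · simp only [pvMin?, Option.some.injEq]
    obtain ⟨hmem, hmin⟩ := pvMinFold_spec xs x
    have hdom : ∀ y ∈ x :: xs, pvLexLt y (t, f) = false := by
      intro y hy
      exact pvHeap_dom hh y (hperm.mem_iff.mpr hy)
    have hroot_mem : (t, f) ∈ x :: xs := hperm.subset (by simp [PvHeap.toList])
    by_contra hne
    have h1 : pvLexLt (pvMinFold x xs) (t, f) = false := hdom _ hmem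
    have h2 : pvLexLt (t, f) (pvMinFold x xs) = true := pvLexLt_total h1 hne
    have h3 := hmin (t, f) hroot_mem
    rw [h3] at h2
    exact Bool.false_ne_true h2

lemma pvLoop_eq (linija2 : List Int) (k : Nat) (fuel : Nat) :
    ∀ (j : Int) (thrd : List (Int × Int)) (h : PvHeap) (out : List (Int × Int)),
      h.toList.Perm thrd → PvIsHeap h → h.size ≤ k →
      pvALoop linija2 fuel j thrd out = pvBLoop linija2 k fuel j h out := by
  induction fuel with
  | zero => intro j thrd h out _ _ _; rfl
  | succ fuel ih =>
    intro j thrd h out hperm hheap hsz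
    rcases h with _ | ⟨⟨t, f⟩, rk, l, r⟩
    · have hthrd : thrd = [] := hperm.symm.eq_nil
      subst hthrd
      simp [pvALoop, pvBLoop, pvMin?]
    · have hmin : pvMin? thrd = some (t, f) := pvMin?_of_heap hperm hheap
      simp only [pvALoop, pvBLoop, hmin]
      rcases hget : PySem.List.pyGet? linija2 j with _ | laiks
      · rfl
      · dsimp only
        simp only [PvHeap.size] at hsz
        have hk1 : l.size + r.size ≤ k := by omega
        have hinsz : (pvHMergeF k l r).size = l.size + r.size := by
          rw [pvHeap_size_toList, (pvHMergeF_perm k l r hk1).length_eq]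
          simp [pvHeap_size_toList]
        have hk2 : (pvHMergeF k l r).size + (PvHeap.node (t + laiks, f) 1 .leaf .leaf).size ≤ k := by
          simp only [hinsz, PvHeap.size]; omega
        have hmem : (t, f) ∈ thrd := hperm.subset (by simp [PvHeap.toList])
        have hrest : (l.toList ++ r.toList).Perm (thrd.erase (t, f)) := by
          have := hperm.erase (t, f)
          simpa [PvHeap.toList, List.erase_cons_head] using this
        have hperm' : (pvHMergeF k (pvHMergeF k l r)
              (.node (t + laiks, f) 1 .leaf .leaf)).toList.Perm
            (pvReplaceFirst (t, f) (t + laiks, f) thrd) := by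
          refine ((pvHMergeF_perm k _ _ hk2).trans ?_).trans (pvReplaceFirst_perm _ hmem).symm
          have h1 : ((pvHMergeF k l r).toList ++ (PvHeap.node (t + laiks, f) 1 .leaf .leaf).toList).Perm
              ((l.toList ++ r.toList) ++ [(t + laiks, f)]) :=
            (pvHMergeF_perm k l r hk1).append (by simp [PvHeap.toList])
          refine h1.trans ?_
          refine (List.perm_append_singleton _ _).trans ?_
          exact hrest.cons _
        have hheap' : PvIsHeap (pvHMergeF k (pvHMergeF k l r)
            (.node (t + laiks, f) 1 .leaf .leaf)) := by
          refine pvHMergeF_isHeap k _ _ hk2 (pvHMergeF_isHeap k _ _ hk1 hheap.2.1 hheap.2.2) ?_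
          exact ⟨by simp [PvHeap.toList], trivial, trivial⟩
        have hsz' : (pvHMergeF k (pvHMergeF k l r)
            (.node (t + laiks, f) 1 .leaf .leaf)).size ≤ k := by
          rw [pvHeap_size_toList, hperm'.length_eq, pvReplaceFirst_length, ← hperm.length_eq]
          simp [PvHeap.toList, pvHeap_size_toList] at hsz ⊢
          omega
        exact ih (j + 1) _ _ _ hperm' hheap' hsz'

lemma pvBuild_spec (k : Nat) (fs : List Int) : ∀ (h0 : PvHeap), PvIsHeap h0 →
    h0.size + fs.length ≤ k →
    PvIsHeap (fs.foldl (fun h f => pvHMergeF k h (.node ((0 : Int), f) 1 .leaf .leaf)) h0) ∧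
    ((fs.foldl (fun h f => pvHMergeF k h (.node ((0 : Int), f) 1 .leaf .leaf)) h0).toList).Perm
      (h0.toList ++ fs.map (fun f => ((0 : Int), f))) := by
  induction fs with
  | nil => intro h0 hh _; exact ⟨hh, by simp⟩
  | cons f fs ih =>
    intro h0 hh hk
    simp only [List.length_cons] at hk
    have hsing : PvIsHeap (.node ((0 : Int), f) 1 .leaf .leaf) :=
      ⟨by simp [PvHeap.toList], trivial, trivial⟩
    have hk1 : h0.size + (PvHeap.node ((0 : Int), f) 1 .leaf .leaf).size ≤ k := by
      simp only [PvHeap.size]; omega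
    have hsz1 : (pvHMergeF k h0 (.node ((0 : Int), f) 1 .leaf .leaf)).size = h0.size + 1 := by
      rw [pvHeap_size_toList, (pvHMergeF_perm k _ _ hk1).length_eq]
      simp [pvHeap_size_toList, PvHeap.toList]
    obtain ⟨ih1, ih2⟩ := ih (pvHMergeF k h0 (.node ((0 : Int), f) 1 .leaf .leaf))
      (pvHMergeF_isHeap k _ _ hk1 hh hsing) (by omega)
    refine ⟨ih1, ?_⟩
    refine ih2.trans ?_
    refine ((pvHMergeF_perm k _ _ hk1).append_right _).trans ?_
    simp [PvHeap.toList, List.append_assoc]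

-- ===== VERDICT (by name: the statement is the Claim_ definition above) =====
theorem parallel_processing_spec : Claim_equal_parallel_processing := by
  intro n m linija2 _ _
  unfold Spec_parallel_processing parallel_processing parallel_processing_alt
  obtain ⟨hheap, hperm⟩ := pvBuild_spec (PySem.List.pyRange 0 n 1).length
    (PySem.List.pyRange 0 n 1) .leaf trivial (by simp [PvHeap.size])
  refine pvLoop_eq linija2 (PySem.List.pyRange 0 n 1).length m.toNat 0 _ _ []
    (by simpa [PvHeap.toList] using hperm) hheap ?_
  rw [pvHeap_size_toList, hperm.length_eq]
  simp [PvHeap.toList]
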